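-- pv_equiv track=rewrite | github.com/simonwhitaker/quiz-scraper | quiz-scraper.py | get_question_pages
-- ===== SOURCE A (Python) =====
-- NUM_REGULAR_QUESTIONS = 8
--
-- def get_question_pages(questions, answers=None):
--     """
--     Returns a list of pages, where each page is the Markdown text to render a
--     single question or answer
--
--     If answers is None, just render a page for each question. Otherwise,
--     render question pages interleaved with answer pages.
--     """
--     pages = []
--     for i, q in enumerate(questions):
--         question_number = i + 1
--         if question_number > NUM_REGULAR_QUESTIONS:
--             # Questions 9 onwards are "what links" questions
--             page = '# {}: What links?\n\n'.format(question_number)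
--
--             # Remove trailing question marks from the question
--             q = q.rstrip('?')
--
--             # Split the question on semicolons, turn into bulleted list
--             page += '\n'.join(['- {}'.format(opt) for opt in q.split('; ')])
--             pages.append(page)
--         else:
--             pages.append('# {}\n\n{}'.format(question_number, q))
--
--         if answers:
--             # If answers were provided, interleave answer pages with question
--             # pages
--             pages.append(answers[i])
--     return pages
-- ===== SOURCE B (Python) =====
-- NUM_REGULAR_QUESTIONS = 8
--
--
-- def get_question_pages(questions, answers=None):
--     """Slice-based: format the first NUM_REGULAR_QUESTIONS questions and the
--     'what links' tail as two separate batches (no per-item branch), then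
--     interleave the pages with the answers in a second indexed pass."""
--     regular = questions[:NUM_REGULAR_QUESTIONS]
--     links = questions[NUM_REGULAR_QUESTIONS:]
--     qpages = ['# {}\n\n{}'.format(n, q) for n, q in enumerate(regular, 1)]
--     qpages += ['# {}: What links?\n\n'.format(n) +
--                '\n'.join('- {}'.format(opt) for opt in q.rstrip('?').split('; '))
--                for n, q in enumerate(links, NUM_REGULAR_QUESTIONS + 1)]
--     if not answers:
--         return qpages
--     return [pg for i, qp in enumerate(qpages) for pg in (qp, answers[i])]
-- ===== Notes on version B (the rewrite author's own statement) =====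
-- stated objective: alternative
-- what changed: A does one accumulating loop with a per-item index test and conditional answer append; B eliminates the branch by slicing questions into the regular prefix and the 'what links' tail, formatting each batch separately, and then recursively interleaving the pages with the answers.
import Mathlib
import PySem

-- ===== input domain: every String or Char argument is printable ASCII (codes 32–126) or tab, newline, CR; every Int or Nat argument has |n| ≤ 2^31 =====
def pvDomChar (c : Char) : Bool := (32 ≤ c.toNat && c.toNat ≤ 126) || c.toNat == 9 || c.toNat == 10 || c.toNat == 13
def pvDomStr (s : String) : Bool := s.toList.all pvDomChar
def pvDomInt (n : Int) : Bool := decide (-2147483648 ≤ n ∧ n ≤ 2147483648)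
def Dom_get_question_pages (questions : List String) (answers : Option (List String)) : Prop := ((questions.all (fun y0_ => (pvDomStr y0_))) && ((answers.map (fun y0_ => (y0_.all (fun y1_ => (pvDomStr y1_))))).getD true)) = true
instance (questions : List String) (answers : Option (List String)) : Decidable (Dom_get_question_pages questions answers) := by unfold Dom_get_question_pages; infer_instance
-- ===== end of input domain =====

-- B slices questions into the regular prefix and the 'what links' tail, formats each batch without a per-item branch, then recursively interleaves with answers; same return value.

-- ===== PORT A =====
-- q.rstrip('?'): drop every trailing '?' (exact hand port; PySem has no single-char rstrip)
def pvRstripQ (s : String) : String :=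
  String.ofList ((s.toList.reverse.dropWhile (· == '?')).reverse)

def get_question_pages (questions : List String) (answers : Option (List String)) : List String :=
  (PySem.List.enumerate questions).foldl
    (fun pages iq =>
      let i := iq.1
      let q := iq.2
      let qn := i + 1
      let pages :=
        if qn > 8 then
          pages ++ ["# " ++ PySem.Int.toStr qn ++ ": What links?\n\n" ++
            PySem.Str.join "\n"
              (((PySem.Str.split? (pvRstripQ q) "; ").getD []).map (fun opt => "- " ++ opt))]
        else
          pages ++ ["# " ++ PySem.Int.toStr qn ++ "\n\n" ++ q]
      match answers with
      | some l => if l ≠ [] then pages ++ [PySem.List.pyGetD l i ""] else pages  -- answers[i]; in range under Pre_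
      | none => pages)
    []

-- ===== PORT B =====
def get_question_pages_alt (questions : List String) (answers : Option (List String)) : List String :=
  let regular := questions.take 8   -- questions[:8]  (exact: nonnegative literal bound)
  let links := questions.drop 8     -- questions[8:]
  let qpages :=
    (PySem.List.enumerate regular 1).map
      (fun nq => "# " ++ PySem.Int.toStr nq.1 ++ "\n\n" ++ nq.2)
    ++ (PySem.List.enumerate links 9).map
      (fun nq => "# " ++ PySem.Int.toStr nq.1 ++ ": What links?\n\n" ++
        PySem.Str.join "\n"
          (((PySem.Str.split? (pvRstripQ nq.2) "; ").getD []).map (fun opt => "- " ++ opt)))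
  match answers with
  | none => qpages
  | some l =>
    if l = [] then qpages
    else (PySem.List.enumerate qpages).flatMap
      (fun iqp => [iqp.2, PySem.List.pyGetD l iqp.1 ""])  -- answers[i]; in range under Pre_

-- ===== PRECONDITION & SPEC =====
-- Pre_ excludes exactly the inputs where A raises IndexError: answers a non-empty list shorter than questions.
def Pre_get_question_pages (questions : List String) (answers : Option (List String)) : Prop :=
  match answers with
  | none => True
  | some l => l ≠ [] → questions.length ≤ l.length

instance (questions : List String) (answers : Option (List String)) : Decidable (Pre_get_question_pages questions answers) := by
  unfold Pre_get_question_pages; cases answers <;> infer_instance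

def pvWitness_get_question_pages : List String × Option (List String) :=
  (["Q one?", "Q two"], some ["A one", "A two"])

def Spec_get_question_pages (questions : List String) (answers : Option (List String)) (out : List String) : Prop := out = get_question_pages_alt questions answers
instance (questions : List String) (answers : Option (List String)) (out : List String) : Decidable (Spec_get_question_pages questions answers out) := by unfold Spec_get_question_pages; infer_instance

-- ===== CLAIM =====
def Claim_equal_get_question_pages : Prop := ∀ (questions : List String) (answers : Option (List String)), Dom_get_question_pages questions answers → Pre_get_question_pages questions answers → Spec_get_question_pages questions answers (get_question_pages questions answers)

-- ===== LEMMAS AND PROOFS =====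

-- A's per-item formatting, as one function of the 0-based index (proof-side only).
def pvFmt (i : Int) (q : String) : String :=
  if i + 1 > 8 then
    "# " ++ PySem.Int.toStr (i + 1) ++ ": What links?\n\n" ++
      PySem.Str.join "\n"
        (((PySem.Str.split? (pvRstripQ q) "; ").getD []).map (fun opt => "- " ++ opt))
  else
    "# " ++ PySem.Int.toStr (i + 1) ++ "\n\n" ++ q

-- A's fold appends a fixed list at each step, so it is a flatMap.
theorem pv_A_eq_flatMap (questions : List String) (answers : Option (List String)) :
    get_question_pages questions answers
      = (PySem.List.enumerate questions).flatMap
          (fun iq =>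
            [pvFmt iq.1 iq.2] ++
              (match answers with
               | some l => if l ≠ [] then [PySem.List.pyGetD l iq.1 ""] else []
               | none => [])) := by
  unfold get_question_pages
  have h :
      (fun (pages : List String) (iq : Int × String) =>
        let i := iq.1
        let q := iq.2
        let qn := i + 1
        let pages :=
          if qn > 8 then
            pages ++ ["# " ++ PySem.Int.toStr qn ++ ": What links?\n\n" ++
              PySem.Str.join "\n"
                (((PySem.Str.split? (pvRstripQ q) "; ").getD []).map (fun opt => "- " ++ opt))]
          else
            pages ++ ["# " ++ PySem.Int.toStr qn ++ "\n\n" ++ q]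
        match answers with
        | some l => if l ≠ [] then pages ++ [PySem.List.pyGetD l i ""] else pages
        | none => pages)
      = (fun pages iq =>
          pages ++
            ([pvFmt iq.1 iq.2] ++
              (match answers with
               | some l => if l ≠ [] then [PySem.List.pyGetD l iq.1 ""] else []
               | none => []))) := by
    funext pages iq
    cases answers with
    | none => by_cases h8 : iq.1 + 1 > 8 <;> simp [pvFmt, h8]
    | some l =>
        by_cases hl : l = [] <;> by_cases h8 : iq.1 + 1 > 8 <;>
          simp [pvFmt, h8, hl]
  rw [h, PySem.List.foldl_append_eq_flatMap]
  simp

-- enumerate at a shifted start.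
theorem pv_enumerate_shift {α : Type} (xs : List α) :
    ∀ s : Int, PySem.List.enumerate xs (s + 1)
      = (PySem.List.enumerate xs s).map (fun p => (p.1 + 1, p.2)) := by
  induction xs with
  | nil => intro s; simp [PySem.List.enumerate]
  | cons x xs ih =>
      intro s
      simp only [PySem.List.enumerate_cons, List.map_cons]
      rw [ih (s + 1)]

-- B's two batched maps are exactly the branch map over the full enumeration.
theorem pv_qpages_eq (questions : List String) :
    ((PySem.List.enumerate (questions.take 8) 1).map
        (fun nq => "# " ++ PySem.Int.toStr nq.1 ++ "\n\n" ++ nq.2)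
      ++ (PySem.List.enumerate (questions.drop 8) 9).map
        (fun nq => "# " ++ PySem.Int.toStr nq.1 ++ ": What links?\n\n" ++
          PySem.Str.join "\n"
            (((PySem.Str.split? (pvRstripQ nq.2) "; ").getD []).map (fun opt => "- " ++ opt))))
      = (PySem.List.enumerate questions).map (fun iq => pvFmt iq.1 iq.2) := by
  conv_rhs => rw [show questions = questions.take 8 ++ questions.drop 8 by simp]
  rw [PySem.List.enumerate_append]
  rw [List.map_append]
  congr 1
  · -- regular part: indices 0 ≤ i < min 8 (len), so i + 1 ≤ 8
    have h1 : PySem.List.enumerate (questions.take 8) 1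
        = (PySem.List.enumerate (questions.take 8) 0).map (fun p => (p.1 + 1, p.2)) := by
      have h := pv_enumerate_shift (questions.take 8) 0
      simpa using h
    rw [h1, List.map_map]
    refine List.map_congr_left ?_
    intro p hp
    rcases (PySem.List.mem_enumerate_iff _ _ _).1 hp with ⟨k, hk, rfl⟩
    have hk8 : k < 8 := lt_of_lt_of_le hk (by simp)
    simp only [Function.comp, pvFmt]
    rw [if_neg (by omega)]
  · -- links part: nonempty ⇒ questions.length > 8, start = 8, indices ≥ 8
    by_cases hle : questions.length ≤ 8
    · simp [List.drop_eq_nil_of_le hle]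
    · have htake : ((questions.take 8).length : Int) = 8 := by
        simp [List.length_take]; omega
      rw [show ((0 : Int) + (questions.take 8).length) = 8 by omega]
      rw [show (9 : Int) = 8 + 1 by norm_num, pv_enumerate_shift (questions.drop 8) 8,
        List.map_map]
      refine List.map_congr_left ?_
      intro p hp
      rcases (PySem.List.mem_enumerate_iff _ _ _).1 hp with ⟨k, hk, rfl⟩
      simp only [Function.comp, pvFmt]
      rw [if_pos (by omega)]

-- enumerating a mapped enumeration keeps the indices.
theorem pv_enumerate_map (g : Int × String → String) :
    ∀ (xs : List String) (s : Int),
      PySem.List.enumerate ((PySem.List.enumerate xs s).map g) s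
        = (PySem.List.enumerate xs s).map (fun iq => (iq.1, g iq)) := by
  intro xs
  induction xs with
  | nil => intro s; simp [PySem.List.enumerate]
  | cons x xs ih =>
      intro s
      simp only [PySem.List.enumerate_cons, List.map_cons, ih (s + 1)]

-- flatMap of singletons is map.
theorem pv_flatMap_single {α β : Type} (f : α → β) (xs : List α) :
    xs.flatMap (fun x => [f x]) = xs.map f := by
  induction xs with
  | nil => rfl
  | cons x xs ih => simp [List.flatMap_cons, ih]

-- ===== VERDICT =====
theorem get_question_pages_spec : Claim_equal_get_question_pages := by
  intro questions answers _hdom _hpre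
  unfold Spec_get_question_pages
  rw [pv_A_eq_flatMap]
  unfold get_question_pages_alt
  simp only []
  cases answers with
  | none =>
      simp only []
      rw [pv_qpages_eq]
      simpa using pv_flatMap_single (fun iq : Int × String => pvFmt iq.1 iq.2)
        (PySem.List.enumerate questions)
  | some l =>
      by_cases hl : l = []
      · simp only [hl]
        rw [pv_qpages_eq]
        simpa using pv_flatMap_single (fun iq : Int × String => pvFmt iq.1 iq.2)
          (PySem.List.enumerate questions)
      · simp only [hl, ne_eq, not_false_eq_true, if_true]
        rw [pv_qpages_eq]
        rw [show (PySem.List.enumerate ((PySem.List.enumerate questions).map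
            (fun iq => pvFmt iq.1 iq.2))) = (PySem.List.enumerate questions).map
            (fun iq => (iq.1, pvFmt iq.1 iq.2)) from pv_enumerate_map _ questions 0,
          List.flatMap_map]
        simp
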